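-- pv_equiv track=rewrite | github.com/alexabravo/LabC | lexer.py | limpiarComentarios
-- ===== SOURCE A (Python) =====
-- def limpiarLlaves(text):
--     resultado = ''
--     saltar = False
--     ignorar = False
--     for caracter in text:
--         if ignorar:
--             if caracter == 'n':
--                 resultado += '\n'
--             elif caracter == 't':
--                 resultado += '\t'
--             elif caracter == 's':
--                 resultado += ' '
--             else:
--                 resultado += '\\' + caracter
--             ignorar = False
--         elif caracter == '\\':
--             ignorar = True
--         elif caracter == '{':
--             saltar = True
--         elif caracter == '}':
--             saltar = False
--         elif not saltar:
--             resultado += caracter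
--     return resultado
--
-- def limpiarComentarios(raw_input):
--     cadenaLimpia = ''
--     aprobado = True
--     for c in range(len(raw_input)):
--         if raw_input[c] == '(':
--             if (c+1 < len(raw_input) and raw_input[c+1] == '*'):
--                 aprobado = False
--         elif raw_input[c] == ')':
--             if (c-1 >= 0 and raw_input[c-1] == '*'):
--                 aprobado = True
--                 continue
--         if aprobado:
--             cadenaLimpia += raw_input[c]
--     return limpiarLlaves(cadenaLimpia)
-- ===== SOURCE B (Python) =====
-- def limpiarComentarios(raw_input):
--     # single fused pass: comment filter feeds the brace/escape machine directly
--     out = []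
--     aprobado = True
--     saltar = False
--     ignorar = False
--     prev = ''
--     n = len(raw_input)
--     for i, ch in enumerate(raw_input):
--         if ch == '(' and i + 1 < n and raw_input[i + 1] == '*':
--             aprobado = False
--         elif ch == ')' and prev == '*':
--             aprobado = True
--             prev = ch
--             continue
--         if aprobado:
--             if ignorar:
--                 if ch == 'n':
--                     out.append('\n')
--                 elif ch == 't':
--                     out.append('\t')
--                 elif ch == 's':
--                     out.append(' ')
--                 else:
--                     out.append('\\' + ch)
--                 ignorar = False
--             elif ch == '\\':
--                 ignorar = True
--             elif ch == '{':
--                 saltar = True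
--             elif ch == '}':
--                 saltar = False
--             elif not saltar:
--                 out.append(ch)
--         prev = ch
--     return ''.join(out)
-- ===== Notes on version B (the rewrite author's own statement) =====
-- stated objective: alternative
-- what changed: A makes two sequential passes (an index loop building an intermediate comment-free string by repeated string +=, then a second character loop for the brace/escape machine); B is a single fused pass over enumerate(raw_input) that feeds each comment-surviving character straight into the inline brace/escape state machine, replaces the raw_input[c-1] lookbehind by a prev-char variable, and accumulates output in a list joined once at the end.
import Mathlib
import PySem

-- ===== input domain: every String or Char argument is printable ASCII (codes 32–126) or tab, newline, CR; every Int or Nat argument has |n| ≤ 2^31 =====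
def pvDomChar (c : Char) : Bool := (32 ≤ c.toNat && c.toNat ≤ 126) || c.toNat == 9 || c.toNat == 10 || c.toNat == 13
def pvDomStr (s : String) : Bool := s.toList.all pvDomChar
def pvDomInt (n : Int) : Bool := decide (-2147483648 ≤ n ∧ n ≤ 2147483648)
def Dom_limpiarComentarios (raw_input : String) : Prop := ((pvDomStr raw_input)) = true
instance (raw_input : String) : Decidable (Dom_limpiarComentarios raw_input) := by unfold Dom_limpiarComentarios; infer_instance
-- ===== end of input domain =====

-- B fuses A's two sequential scans into one pass (comment filter feeding the brace/escape
-- machine directly, with a prev-char variable and a list accumulator); objective: alternative (measured faster in a timing run).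

-- ===== PORT A =====
-- limpiarLlaves body: one step of the brace/escape state machine; state = (saltar, ignorar, resultado)
def llStep (st : Bool × Bool × List Char) (ch : Char) : Bool × Bool × List Char :=
  if st.2.1 then
    if ch = 'n' then (st.1, false, st.2.2 ++ ['\n'])
    else if ch = 't' then (st.1, false, st.2.2 ++ ['\t'])
    else if ch = 's' then (st.1, false, st.2.2 ++ [' '])
    else (st.1, false, st.2.2 ++ ['\\', ch])
  else if ch = '\\' then (st.1, true, st.2.2)
  else if ch = '{' then (true, st.2.1, st.2.2)
  else if ch = '}' then (false, st.2.1, st.2.2)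
  else if !st.1 then (st.1, st.2.1, st.2.2 ++ [ch])
  else st

def limpiarLlaves (text : List Char) : List Char :=
  (text.foldl llStep (false, false, [])).2.2

-- body of A's index loop; state = (aprobado, cadenaLimpia)
def aStep (l : List Char) (n : Int) (st : Bool × List Char) (c : Int) : Bool × List Char :=
  let ch := PySem.List.pyGetD l c ' '
  if ch = '(' then
    let apr := if c + 1 < n ∧ PySem.List.pyGetD l (c + 1) ' ' = '*' then false else st.1
    (apr, if apr then st.2 ++ [ch] else st.2)
  else if ch = ')' then
    if 0 ≤ c - 1 ∧ PySem.List.pyGetD l (c - 1) ' ' = '*' then (true, st.2)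
    else (st.1, if st.1 then st.2 ++ [ch] else st.2)
  else (st.1, if st.1 then st.2 ++ [ch] else st.2)

def limpiarComentarios (raw_input : String) : String :=
  let l := raw_input.toList
  let n : Int := l.length
  let st := (PySem.List.pyRange 0 n 1).foldl (aStep l n) (true, [])
  String.ofList (limpiarLlaves st.2)

-- ===== PORT B =====
-- body of B's single fused loop; state = (aprobado, saltar, ignorar, out, prev)
def bStep (l : List Char) (n : Int) (st : Bool × Bool × Bool × List Char × Option Char)
    (p : Int × Char) : Bool × Bool × Bool × List Char × Option Char :=
  let ch := p.2
  let apr := st.1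
  let sal := st.2.1
  let ign := st.2.2.1
  let out := st.2.2.2.1
  let prev := st.2.2.2.2
  if ch = '(' ∧ p.1 + 1 < n ∧ PySem.List.pyGetD l (p.1 + 1) ' ' = '*' then
    (false, sal, ign, out, some ch)
  else if ch = ')' ∧ prev = some '*' then
    (true, sal, ign, out, some ch)
  else if apr then
    if ign then
      if ch = 'n' then (apr, sal, false, out ++ ['\n'], some ch)
      else if ch = 't' then (apr, sal, false, out ++ ['\t'], some ch)
      else if ch = 's' then (apr, sal, false, out ++ [' '], some ch)
      else (apr, sal, false, out ++ ['\\', ch], some ch)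
    else if ch = '\\' then (apr, sal, true, out, some ch)
    else if ch = '{' then (apr, true, ign, out, some ch)
    else if ch = '}' then (apr, false, ign, out, some ch)
    else if !sal then (apr, sal, ign, out ++ [ch], some ch)
    else (apr, sal, ign, out, some ch)
  else (apr, sal, ign, out, some ch)

def limpiarComentarios_alt (raw_input : String) : String :=
  let l := raw_input.toList
  let n : Int := l.length
  let st := (PySem.List.enumerate l 0).foldl (bStep l n) (true, false, false, [], none)
  String.ofList st.2.2.2.1

-- ===== PRECONDITION & SPEC =====
def Spec_limpiarComentarios (raw_input : String) (out : String) : Prop := out = limpiarComentarios_alt raw_input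
instance (raw_input : String) (out : String) : Decidable (Spec_limpiarComentarios raw_input out) := by unfold Spec_limpiarComentarios; infer_instance

-- ===== CLAIM (what is proved, stated in full; the proofs are below) =====
def Claim_equal_limpiarComentarios : Prop := ∀ (raw_input : String), Dom_limpiarComentarios raw_input → Spec_limpiarComentarios raw_input (limpiarComentarios raw_input)

-- ===== LEMMAS AND PROOFS =====

-- B's prev variable after m iterations
def prevOf (l : List Char) (m : Nat) : Option Char :=
  if m = 0 then none else some (l.getD (m - 1) ' ')

-- bundle: A's two-pass state viewed as B's fused state
def glue (l : List Char) (m : Nat) (A : Bool × List Char) :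
    Bool × Bool × Bool × List Char × Option Char :=
  let L := A.2.foldl llStep (false, false, [])
  (A.1, L.1, L.2.1, L.2.2, prevOf l m)

lemma key (l : List Char) : ∀ m : Nat, m ≤ l.length →
    (PySem.List.pyRange 0 (m : Int) 1).foldl
        (fun st j => bStep l (l.length : Int) st (j, PySem.List.pyGetD l j ' '))
        (true, false, false, [], none)
      = glue l m ((PySem.List.pyRange 0 (m : Int) 1).foldl (aStep l (l.length : Int)) (true, [])) := by
  intro m
  induction m with
  | zero =>
      intro _
      simp [glue, prevOf]
  | succ m ih =>
      intro hm
      have hm' : m ≤ l.length := Nat.le_of_succ_le hm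
      have hrange : PySem.List.pyRange 0 ((m + 1 : Nat) : Int) 1
          = PySem.List.pyRange 0 (m : Int) 1 ++ [(m : Int)] := by
        push_cast
        exact PySem.List.pyRange_one_succ_right (by positivity)
      rw [hrange, List.foldl_append, List.foldl_append, ih hm']
      set A := (PySem.List.pyRange 0 (m : Int) 1).foldl (aStep l (l.length : Int)) (true, []) with hA
      obtain ⟨apr, kept⟩ := A
      have hch : PySem.List.pyGetD l (m : Int) ' ' = l.getD m ' ' :=
        PySem.List.pyGetD_natCast l m ' '
      have hprev' : prevOf l (m + 1) = some (l.getD m ' ') := by simp [prevOf]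
      have hcond : (0 ≤ (m : Int) - 1 ∧ PySem.List.pyGetD l ((m : Int) - 1) ' ' = '*')
          ↔ prevOf l m = some '*' := by
        cases m with
        | zero => simp [prevOf]
        | succ k =>
            have he : PySem.List.pyGetD l (((k + 1 : Nat) : Int) - 1) ' ' = l.getD k ' ' := by
              rw [show (((k + 1 : Nat) : Int) - 1) = ((k : Nat) : Int) by push_cast; ring]
              exact PySem.List.pyGetD_natCast l k ' '
            have hle : (0 : Int) ≤ ((k + 1 : Nat) : Int) - 1 := by push_cast; omega
            rw [he]
            simp [prevOf]
      have hfeed : ∀ c : Char,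
          (kept ++ [c]).foldl llStep (false, false, []) =
            llStep (kept.foldl llStep (false, false, [])) c := by
        intro c; rw [List.foldl_append]; simp
      simp only [List.foldl_cons, List.foldl_nil, glue]
      rcases hL : List.foldl llStep (false, false, []) kept with ⟨sal, ign, res⟩
      by_cases h1 : l.getD m ' ' = '(' ∧ (m : Int) + 1 < (l.length : Int) ∧
          PySem.List.pyGetD l ((m : Int) + 1) ' ' = '*'
      · -- comment opener: aprobado becomes false, nothing emitted
        simp only [bStep, aStep, hch]
        rw [if_pos h1, if_pos h1.1, if_pos ⟨h1.2.1, h1.2.2⟩]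
        simp [hprev', hL]
      · by_cases h2 : l.getD m ' ' = ')' ∧ prevOf l m = some '*'
        · -- comment closer: skipped, aprobado becomes true
          have h2' : 0 ≤ (m : Int) - 1 ∧ PySem.List.pyGetD l ((m : Int) - 1) ' ' = '*' :=
            hcond.mpr h2.2
          have hne : l.getD m ' ' ≠ '(' := by rw [h2.1]; decide
          simp only [bStep, aStep, hch]
          rw [if_neg (by tauto), if_pos h2, if_neg hne, if_pos h2.1, if_pos h2']
          simp [hprev', hL]
        · -- ordinary character: fed to the brace machine iff aprobado
          rcases Classical.em (l.getD m ' ' = '(') with hp | hp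
          · have hno : ¬ ((m : Int) + 1 < (l.length : Int) ∧
                PySem.List.pyGetD l ((m : Int) + 1) ' ' = '*') := fun hc => h1 ⟨hp, hc⟩
            simp only [bStep, aStep, hch]
            rw [if_neg (by tauto), if_neg (by tauto), if_pos hp, if_neg hno]
            cases apr with
            | false => simp [hprev', hL]
            | true =>
                rw [if_pos rfl, if_pos rfl, hfeed, hL]
                simp only [llStep]
                split_ifs <;> simp [hprev']
          · rcases Classical.em (l.getD m ' ' = ')') with hq | hq
            · have hnc : ¬ (0 ≤ (m : Int) - 1 ∧
                  PySem.List.pyGetD l ((m : Int) - 1) ' ' = '*') := fun hc => h2 ⟨hq, hcond.mp hc⟩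
              simp only [bStep, aStep, hch]
              rw [if_neg (by tauto), if_neg (by tauto), if_neg hp, if_pos hq, if_neg hnc]
              cases apr with
              | false => simp [hprev', hL]
              | true =>
                  rw [if_pos rfl, if_pos rfl, hfeed, hL]
                  simp only [llStep]
                  split_ifs <;> simp [hprev']
            · simp only [bStep, aStep, hch]
              rw [if_neg (by tauto), if_neg (by tauto), if_neg hp, if_neg hq]
              cases apr with
              | false => simp [hprev', hL]
              | true =>
                  rw [if_pos rfl, if_pos rfl, hfeed, hL]
                  simp only [llStep]
                  split_ifs <;> simp [hprev']

-- ===== VERDICT (by name: the statement is the Claim_ definition above) =====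
theorem limpiarComentarios_spec : Claim_equal_limpiarComentarios := by
  intro raw_input _
  unfold Spec_limpiarComentarios
  simp only [limpiarComentarios, limpiarComentarios_alt]
  rw [PySem.List.enumerate_eq_map_pyRange raw_input.toList ' ', List.foldl_map]
  simp only [PySem.List.len_eq]
  rw [key raw_input.toList raw_input.toList.length le_rfl]
  rfl
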